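-- pv_equiv track=rewrite | github.com/RATHOD-SHUBHAM/DataStructure-And-Algorithm | AlgoExpert/Dp/Max Sum Increasing Subsequence/LIS/all_in_one.py | buildSubsequence
-- ===== SOURCE A (Python) =====
-- def buildSubsequence(array, pointerToSubsequence, curIndex):
--     subseq = []
--     total = 0
--
--     while curIndex is not None:
--         total += array[curIndex]
--         subseq.append(array[curIndex])
--         curIndex = pointerToSubsequence[curIndex]
--
--     return (total, subseq[::-1])
-- ===== SOURCE B (Python) =====
-- def buildSubsequence(array, pointerToSubsequence, curIndex):
--     # Recursion over the pointer chain: unwind to the chain's start first, so the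
--     # subsequence comes out in order naturally and no reversal is needed.
--     def helper(i):
--         if i is None:
--             return (0, [])
--         total, subseq = helper(pointerToSubsequence[i])
--         return (total + array[i], subseq + [array[i]])
--     return helper(curIndex)
-- ===== Notes on version B (the rewrite author's own statement) =====
-- stated objective: alternative
-- what changed: B replaces A's iterative accumulator loop plus final reversal with a direct recursion over the pointer chain whose unwinding builds the (total, subsequence) pair already in order, so the [::-1] disappears.
import Mathlib
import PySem

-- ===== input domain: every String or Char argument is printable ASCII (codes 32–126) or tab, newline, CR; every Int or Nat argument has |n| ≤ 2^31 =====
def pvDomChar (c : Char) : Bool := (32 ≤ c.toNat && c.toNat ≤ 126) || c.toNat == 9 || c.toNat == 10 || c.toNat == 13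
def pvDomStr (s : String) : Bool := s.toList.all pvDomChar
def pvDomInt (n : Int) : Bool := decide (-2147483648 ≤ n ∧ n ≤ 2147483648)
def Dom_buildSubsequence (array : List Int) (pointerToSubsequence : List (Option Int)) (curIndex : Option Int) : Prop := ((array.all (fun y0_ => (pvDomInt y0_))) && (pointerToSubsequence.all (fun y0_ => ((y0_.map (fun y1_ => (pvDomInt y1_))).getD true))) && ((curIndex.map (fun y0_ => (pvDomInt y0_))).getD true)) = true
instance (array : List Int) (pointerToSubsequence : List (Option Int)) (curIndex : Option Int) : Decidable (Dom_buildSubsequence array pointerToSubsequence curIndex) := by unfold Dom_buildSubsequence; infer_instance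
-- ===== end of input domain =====

-- B recurses over the pointer chain, building (total, subsequence) on the way back up
-- so the list comes out in order without A's final reversal (objective: alternative).


-- ===== PORT A =====
-- A's while loop: running total and value list in walk order, reversed at the end.
-- Fuel makes the loop total; inside Pre_ the chain reaches None within
-- pointerToSubsequence.length steps, so fuel = length + 1 always suffices.
-- Outside Pre_ (where the Python raises IndexError or loops forever) the totality
-- fallbacks fire: array[c] defaults to 0 on IndexError, a failed pointer lookup or
-- exhausted fuel ends the loop; inside Pre_ none of them ever fires.
def pvLoopA (array : List Int) (ptr : List (Option Int)) :
    Nat → Option Int → Int → List Int → Int × List Int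
  | 0, _, total, subseq => (total, subseq)
  | _ + 1, none, total, subseq => (total, subseq)
  | f + 1, some c, total, subseq =>
    let v := (PySem.List.pyGet? array c).getD 0
    match PySem.List.pyGet? ptr c with
    | some nx => pvLoopA array ptr f nx (total + v) (subseq ++ [v])
    | none => (total + v, subseq ++ [v])

def buildSubsequence (array : List Int) (pointerToSubsequence : List (Option Int)) (curIndex : Option Int) : Int × List Int :=
  let r := pvLoopA array pointerToSubsequence (pointerToSubsequence.length + 1) curIndex 0 []
  (r.1, r.2.reverse)

-- ===== PORT B =====
-- B's helper(i): (0, []) at None, else recurse on pointerToSubsequence[i] and append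
-- array[i] to both components on the way back up. Fuel as in port A; where the Python
-- raises (pointer lookup out of range) the recursion stops with the current element —
-- an arbitrary totality fallback, never reached inside Pre_.
def pvHelperB (array : List Int) (ptr : List (Option Int)) :
    Nat → Option Int → Int × List Int
  | 0, _ => (0, [])
  | _ + 1, none => (0, [])
  | f + 1, some c =>
    match PySem.List.pyGet? ptr c with
    | some nx =>
      let r := pvHelperB array ptr f nx
      let v := (PySem.List.pyGet? array c).getD 0
      (r.1 + v, r.2 ++ [v])
    | none =>
      let v := (PySem.List.pyGet? array c).getD 0
      (v, [v])

def buildSubsequence_alt (array : List Int) (pointerToSubsequence : List (Option Int)) (curIndex : Option Int) : Int × List Int :=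
  pvHelperB array pointerToSubsequence (pointerToSubsequence.length + 1) curIndex

-- ===== PRECONDITION & SPEC =====
-- One step of the pointer chain as a plain successor map: `none` = an index left
-- range (IndexError), `some none` = the chain ended at None, `some (some j)` = now at j.
def pvStep (array : List Int) (ptr : List (Option Int)) (x : Option (Option Int)) : Option (Option Int) :=
  match x with
  | none => none
  | some none => some none
  | some (some j) =>
    if PySem.Raise.InRange array.length j ∧ PySem.Raise.InRange ptr.length j
    then some (PySem.List.pyGetD ptr j none) else none

-- Pre_ holds exactly when the pointer chain from curIndex stays in range (Python's
-- negative-index wraparound included) and reaches None; outside it A raises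
-- IndexError or loops forever on a cycle (a terminating chain never repeats an
-- index, so it ends within length + 1 steps).
def Pre_buildSubsequence (array : List Int) (pointerToSubsequence : List (Option Int)) (curIndex : Option Int) : Prop :=
  (pvStep array pointerToSubsequence)^[pointerToSubsequence.length + 1] (some curIndex) = some none
instance (array : List Int) (pointerToSubsequence : List (Option Int)) (curIndex : Option Int) : Decidable (Pre_buildSubsequence array pointerToSubsequence curIndex) := by unfold Pre_buildSubsequence; infer_instance

def pvWitness_buildSubsequence : List Int × List (Option Int) × Option Int :=
  ([8, 5, -2, 9], [none, some 0, some 1, some 1], some 3)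

def Spec_buildSubsequence (array : List Int) (pointerToSubsequence : List (Option Int)) (curIndex : Option Int) (out : Int × List Int) : Prop := out = buildSubsequence_alt array pointerToSubsequence curIndex
instance (array : List Int) (pointerToSubsequence : List (Option Int)) (curIndex : Option Int) (out : Int × List Int) : Decidable (Spec_buildSubsequence array pointerToSubsequence curIndex out) := by unfold Spec_buildSubsequence; infer_instance

-- ===== CLAIM (what is proved, stated in full; the proofs are below) =====
def Claim_equal_buildSubsequence : Prop := ∀ (array : List Int) (pointerToSubsequence : List (Option Int)) (curIndex : Option Int), Dom_buildSubsequence array pointerToSubsequence curIndex → Pre_buildSubsequence array pointerToSubsequence curIndex → Spec_buildSubsequence array pointerToSubsequence curIndex (buildSubsequence array pointerToSubsequence curIndex)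

-- ===== LEMMAS AND PROOFS =====

-- Main invariant (it holds for every input, Pre_ or not, because the two ports'
-- totality fallbacks stop the walk at the same point): A's accumulator loop equals
-- the starting total/subseq extended by B's recursion, with the list reversed.
lemma pvLoop_helper (array : List Int) (ptr : List (Option Int)) :
    ∀ (f : Nat) (cur : Option Int) (total : Int) (subseq : List Int),
      pvLoopA array ptr f cur total subseq =
        (total + (pvHelperB array ptr f cur).1,
         subseq ++ (pvHelperB array ptr f cur).2.reverse) := by
  intro f
  induction f with
  | zero => intro cur total subseq; simp [pvLoopA, pvHelperB]
  | succ f ih =>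
    intro cur total subseq
    match cur with
    | none => simp [pvLoopA, pvHelperB]
    | some c =>
      match hgp : PySem.List.pyGet? ptr c with
      | some nx =>
        simp only [pvLoopA, pvHelperB, hgp, ih]
        rw [Prod.ext_iff]
        constructor
        · simp; ring
        · simp
      | none => simp [pvLoopA, pvHelperB, hgp]

theorem buildSubsequence_spec : Claim_equal_buildSubsequence := by
  intro array ptr cur _ _
  unfold Spec_buildSubsequence buildSubsequence buildSubsequence_alt
  rw [pvLoop_helper array ptr (ptr.length + 1) cur 0 []]
  simp
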